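-- pv_equiv track=rewrite | github.com/pmbstyle/OctoPal | src/octopal/runtime/workers/runtime.py | _normalize_permission_names
-- ===== SOURCE A (Python) =====
-- _PERMISSION_ALIASES = {
--     "spawn_children": "worker_manage",
-- }
--
-- def _normalize_name_list(value: object) -> list[str]:
--     if not isinstance(value, list):
--         return []
--     normalized: list[str] = []
--     seen: set[str] = set()
--     for item in value:
--         text = str(item).strip().lower()
--         if not text or text in seen:
--             continue
--         seen.add(text)
--         normalized.append(text)
--     return normalized
--
-- def _normalize_permission_names(value: object) -> list[str]:
--     normalized: list[str] = []
--     seen: set[str] = set()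
--     for item in _normalize_name_list(value):
--         canonical = _PERMISSION_ALIASES.get(item, item)
--         if canonical in seen:
--             continue
--         seen.add(canonical)
--         normalized.append(canonical)
--     return normalized
-- ===== SOURCE B (Python) =====
-- _PERMISSION_ALIASES = {
--     "spawn_children": "worker_manage",
-- }
--
-- def _normalize_permission_names(value: object) -> list[str]:
--     if not isinstance(value, list):
--         return []
--     canon = [_PERMISSION_ALIASES.get(t, t)
--              for t in (str(item).strip().lower() for item in value)]
--     return list(dict.fromkeys(c for c in canon if c))
-- ===== Notes on version B (the rewrite author's own statement) =====
-- stated objective: idiomatic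
-- what changed: Replaces A's two sequential seen-set accumulator loops (normalize+dedup by raw text, then alias-map+dedup by canonical) with a loop-free map/filter/dict.fromkeys pipeline: map every item to its canonical name, drop empties, and let dict.fromkeys do the first-occurrence dedup (the raw-text dedup is subsumed by the canonical dedup).
import Mathlib
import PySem

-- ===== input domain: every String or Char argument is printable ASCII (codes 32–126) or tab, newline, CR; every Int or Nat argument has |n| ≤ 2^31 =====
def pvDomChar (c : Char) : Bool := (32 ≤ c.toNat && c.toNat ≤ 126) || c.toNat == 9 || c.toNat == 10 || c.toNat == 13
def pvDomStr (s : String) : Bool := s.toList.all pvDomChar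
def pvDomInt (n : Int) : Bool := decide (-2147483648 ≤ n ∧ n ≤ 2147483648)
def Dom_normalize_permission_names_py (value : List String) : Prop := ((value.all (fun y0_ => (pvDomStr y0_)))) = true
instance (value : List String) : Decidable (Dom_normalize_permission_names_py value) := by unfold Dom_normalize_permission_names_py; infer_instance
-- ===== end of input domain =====

-- B replaces A's two seen-set accumulator loops by a loop-free map / filter /
-- dict.fromkeys pipeline (objective: idiomatic). Equivalence proved for all inputs.

-- ===== PORT A =====

-- module constant _PERMISSION_ALIASES
def pvAliases : PySem.Dict String String := PySem.Dict.ofList [("spawn_children", "worker_manage")]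

-- _normalize_name_list; Lean's typing makes `value` always a list, so the
-- `not isinstance(value, list)` branch is unreachable here.
def normalize_name_list_py (value : List String) : List String :=
  (value.foldl (fun (st : List String × PySem.Set String) item =>
      let text := PySem.Str.lower (PySem.Str.strip item)
      if text = "" ∨ text ∈ st.2 then st
      else (st.1 ++ [text], PySem.Set.add st.2 text))
    ([], PySem.Set.empty)).1

def normalize_permission_names_py (value : List String) : List String :=
  ((normalize_name_list_py value).foldl (fun (st : List String × PySem.Set String) item =>
      let canonical := PySem.Dict.getD pvAliases item item
      if canonical ∈ st.2 then st
      else (st.1 ++ [canonical], PySem.Set.add st.2 canonical))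
    ([], PySem.Set.empty)).1

-- ===== PORT B =====
-- map each item to its canonical name, drop empties, dedup with dict.fromkeys
-- (dict.fromkeys = PySem.List.dedup, first occurrences in order)
def normalize_permission_names_py_alt (value : List String) : List String :=
  PySem.List.dedup
    ((value.map (fun item =>
        let t := PySem.Str.lower (PySem.Str.strip item)
        PySem.Dict.getD pvAliases t t)).filter (fun c => !(c == "")))

-- ===== PRECONDITION & SPEC =====
def Spec_normalize_permission_names_py (value : List String) (out : List String) : Prop := out = normalize_permission_names_py_alt value
instance (value : List String) (out : List String) : Decidable (Spec_normalize_permission_names_py value out) := by unfold Spec_normalize_permission_names_py; infer_instance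

-- ===== CLAIM (what is proved, stated in full; the proofs are below) =====
def Claim_equal_normalize_permission_names_py : Prop := ∀ (value : List String), Dom_normalize_permission_names_py value → Spec_normalize_permission_names_py value (normalize_permission_names_py value)

-- ===== LEMMAS AND PROOFS =====

-- canonical name of a text
def pvCanon (t : String) : String := PySem.Dict.getD pvAliases t t

-- recursive form of A's pass 1 (dedup of normalized texts), seen-set explicit
def pvNorm1 : List String → PySem.Set String → List String
  | [], _ => []
  | x :: xs, s =>
    let t := PySem.Str.lower (PySem.Str.strip x)
    if t = "" ∨ t ∈ s then pvNorm1 xs s else t :: pvNorm1 xs (PySem.Set.add s t)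

-- recursive form of A's pass 2 (alias map + dedup on canonicals)
def pvNorm2 : List String → PySem.Set String → List String
  | [], _ => []
  | x :: xs, s =>
    let c := pvCanon x
    if c ∈ s then pvNorm2 xs s else c :: pvNorm2 xs (PySem.Set.add s c)

-- one-pass fusion of the two, seen-set keyed on canonicals only
def pvFused : List String → PySem.Set String → List String
  | [], _ => []
  | x :: xs, s =>
    let t := PySem.Str.lower (PySem.Str.strip x)
    if t = "" then pvFused xs s
    else
      let c := pvCanon t
      if c ∈ s then pvFused xs s else c :: pvFused xs (PySem.Set.add s c)

-- intermediate: pass 2 fused over pass 1's output, keeping BOTH seen-sets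
def pvFused1 : List String → PySem.Set String → PySem.Set String → List String
  | [], _, _ => []
  | x :: xs, s1, s2 =>
    let t := PySem.Str.lower (PySem.Str.strip x)
    if t = "" ∨ t ∈ s1 then pvFused1 xs s1 s2
    else
      let c := pvCanon t
      if c ∈ s2 then pvFused1 xs (PySem.Set.add s1 t) s2
      else c :: pvFused1 xs (PySem.Set.add s1 t) (PySem.Set.add s2 c)

-- A's first foldl computes pvNorm1 (accumulator generalized)
theorem pvFoldl1 (l : List String) (acc : List String) (s : PySem.Set String) :
    (l.foldl (fun (st : List String × PySem.Set String) item =>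
      let text := PySem.Str.lower (PySem.Str.strip item)
      if text = "" ∨ text ∈ st.2 then st
      else (st.1 ++ [text], PySem.Set.add st.2 text)) (acc, s)).1 = acc ++ pvNorm1 l s := by
  induction l generalizing acc s with
  | nil => simp [pvNorm1]
  | cons x xs ih =>
    simp only [List.foldl_cons, pvNorm1]
    split
    · exact ih acc s
    · rw [ih]; simp

-- A's second foldl computes pvNorm2
theorem pvFoldl2 (l : List String) (acc : List String) (s : PySem.Set String) :
    (l.foldl (fun (st : List String × PySem.Set String) item =>
      let canonical := PySem.Dict.getD pvAliases item item
      if canonical ∈ st.2 then st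
      else (st.1 ++ [canonical], PySem.Set.add st.2 canonical)) (acc, s)).1 = acc ++ pvNorm2 l s := by
  induction l generalizing acc s with
  | nil => simp [pvNorm2]
  | cons x xs ih =>
    simp only [List.foldl_cons, pvNorm2, pvCanon]
    split
    · exact ih acc s
    · rw [ih]; simp

-- pass 2 over pass 1's output is the two-seen-set fused loop
theorem pvNorm2_norm1 (l : List String) (s1 s2 : PySem.Set String) :
    pvNorm2 (pvNorm1 l s1) s2 = pvFused1 l s1 s2 := by
  induction l generalizing s1 s2 with
  | nil => simp [pvNorm1, pvNorm2, pvFused1]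
  | cons x xs ih =>
    simp only [pvNorm1, pvFused1]
    split
    · exact ih s1 s2
    · simp only [pvNorm2]
      split
      · exact ih _ s2
      · rw [ih]

-- when every text in s1 has its canonical in s2, the text-level seen-set is redundant
theorem pvFused1_eq_fused (l : List String) (s1 s2 : PySem.Set String)
    (H : ∀ t ∈ s1, pvCanon t ∈ s2) : pvFused1 l s1 s2 = pvFused l s2 := by
  induction l generalizing s1 s2 with
  | nil => simp [pvFused1, pvFused]
  | cons x xs ih =>
    simp only [pvFused1, pvFused]
    by_cases h0 : PySem.Str.lower (PySem.Str.strip x) = ""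
    · simp only [h0, true_or, if_pos]
      exact ih s1 s2 H
    · by_cases h1 : PySem.Str.lower (PySem.Str.strip x) ∈ s1
      · have hc : pvCanon (PySem.Str.lower (PySem.Str.strip x)) ∈ s2 := H _ h1
        simp only [h0, h1, or_true, if_true, if_pos hc]
        exact ih s1 s2 H
      · simp only [h0, h1, or_self, if_false]
        split
        · rename_i hc
          rw [ih (PySem.Set.add s1 _) s2]
          intro t ht
          rcases (PySem.Set.mem_add _ _ _).1 ht with h | h
          · exact H t h
          · subst h; exact hc
        · rename_i hc
          rw [ih (PySem.Set.add s1 _) (PySem.Set.add s2 _)]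
          intro t ht
          rcases (PySem.Set.mem_add _ _ _).1 ht with h | h
          · exact (PySem.Set.mem_add _ _ _).2 (Or.inl (H t h))
          · subst h; exact (PySem.Set.mem_add _ _ _).2 (Or.inr rfl)

-- the canonical of a text is empty iff the text is empty
theorem pvCanon_empty_iff (t : String) : pvCanon t = "" ↔ t = "" := by
  unfold pvCanon
  by_cases h : t = "spawn_children"
  · subst h; decide
  · have hct : pvAliases.contains t = false := by
      simp [pvAliases, PySem.Dict.ofList, PySem.Dict.contains, PySem.Dict.update,
        PySem.Dict.insert, PySem.Dict.empty]
      exact fun a => h a.symm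
    rw [PySem.Dict.getD_of_not_contains pvAliases t hct]

-- updating a seen-set with B's filtered canonical list appends exactly pvFused
theorem pvUpdate_eq_fused (l : List String) (s : PySem.Set String) :
    PySem.Set.update s
      ((l.map (fun item =>
          let t := PySem.Str.lower (PySem.Str.strip item)
          PySem.Dict.getD pvAliases t t)).filter (fun c => !(c == "")))
      = s ++ pvFused l s := by
  induction l generalizing s with
  | nil => simp [pvFused, PySem.Set.update_nil]
  | cons x xs ih =>
    simp only [List.map_cons, List.filter_cons, pvFused]
    rw [show (PySem.Dict.getD pvAliases (PySem.Str.lower (PySem.Str.strip x))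
          (PySem.Str.lower (PySem.Str.strip x)))
        = pvCanon (PySem.Str.lower (PySem.Str.strip x)) from rfl]
    by_cases h0 : PySem.Str.lower (PySem.Str.strip x) = ""
    · have hc : pvCanon (PySem.Str.lower (PySem.Str.strip x)) = "" :=
        (pvCanon_empty_iff _).2 h0
      rw [if_pos h0, hc, if_neg (by decide)]
      exact ih s
    · have hbe : (!(pvCanon (PySem.Str.lower (PySem.Str.strip x)) == "")) = true := by
        simp
        exact fun h => h0 ((pvCanon_empty_iff _).1 h)
      rw [if_neg h0, if_pos hbe, PySem.Set.update_cons]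
      by_cases hmem : pvCanon (PySem.Str.lower (PySem.Str.strip x)) ∈ s
      · rw [if_pos hmem, PySem.Set.add_of_mem hmem]
        exact ih s
      · rw [if_neg hmem,
          ih (PySem.Set.add s (pvCanon (PySem.Str.lower (PySem.Str.strip x)))),
          PySem.Set.add_of_not_mem hmem]
        simp

-- ===== VERDICT (by name: the statement is the Claim_ definition above) =====
theorem normalize_permission_names_py_spec : Claim_equal_normalize_permission_names_py := by
  intro value _
  unfold Spec_normalize_permission_names_py
  unfold normalize_permission_names_py normalize_name_list_py normalize_permission_names_py_alt
  rw [pvFoldl1, pvFoldl2]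
  simp only [List.nil_append]
  rw [pvNorm2_norm1, pvFused1_eq_fused _ _ _ (by intro t ht; simp [PySem.Set.empty] at ht)]
  rw [PySem.List.dedup_eq_ofList, PySem.Set.ofList_eq_foldl]
  exact (pvUpdate_eq_fused value PySem.Set.empty).symm
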